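-- pv_equiv track=rewrite | github.com/AdityaVandan/content-machine | v2/agents/uploader_agent.py | format_twitter_thread
-- ===== SOURCE A (Python) =====
-- def format_twitter_thread(refined_content: str) -> list[str]:
--     """Parse ## Tweet N sections into a list of tweet strings."""
--     tweets: list[str] = []
--     current_lines: list[str] = []
--
--     for line in refined_content.split("\n"):
--         if line.strip().startswith("## Tweet") and current_lines:
--             text = "\n".join(current_lines).strip()
--             if text:
--                 tweets.append(text)
--             current_lines = []
--         elif not line.strip().startswith("## Tweet"):
--             current_lines.append(line)
--
--     # flush last tweet
--     text = "\n".join(current_lines).strip()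
--     if text:
--         tweets.append(text)
--
--     return [t for t in tweets if t]
-- ===== SOURCE B (Python) =====
-- def format_twitter_thread(refined_content: str) -> list[str]:
--     """Parse ## Tweet N sections into a list of tweet strings."""
--     tweets: list[str] = []
--     lines = refined_content.split("\n")
--     while lines:
--         cut = next((i for i, l in enumerate(lines)
--                     if l.strip().startswith("## Tweet")), len(lines))
--         text = "\n".join(lines[:cut]).strip()
--         if text:
--             tweets.append(text)
--         lines = lines[cut + 1:]
--     return tweets
-- ===== Notes on version B (the rewrite author's own statement) =====
-- stated objective: alternative
-- what changed: Replaces A's stateful accumulate-into-buffer/flush-on-header single pass by a cut-at-next-header loop: repeatedly find the first '## Tweet' line, join-and-strip the slice before it, and continue after it, keeping no line buffer.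
import Mathlib
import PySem

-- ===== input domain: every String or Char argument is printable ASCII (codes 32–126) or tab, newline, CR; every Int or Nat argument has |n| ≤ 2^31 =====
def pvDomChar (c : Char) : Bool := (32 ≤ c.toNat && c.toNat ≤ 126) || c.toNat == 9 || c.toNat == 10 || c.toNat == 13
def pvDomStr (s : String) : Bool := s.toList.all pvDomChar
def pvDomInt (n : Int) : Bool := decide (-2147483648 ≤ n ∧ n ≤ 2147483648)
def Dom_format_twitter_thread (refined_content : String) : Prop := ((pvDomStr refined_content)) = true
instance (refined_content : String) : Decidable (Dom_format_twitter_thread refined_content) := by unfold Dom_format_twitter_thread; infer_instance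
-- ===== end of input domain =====

-- B replaces A's stateful line-buffer/flush loop by repeatedly cutting the line list
-- at the next "## Tweet" header and emitting the slice before it (no running buffer);
-- same cost class, objective: alternative decomposition.

-- line.strip().startswith("## Tweet")
def pvIsTweetHeader (line : String) : Bool :=
  PySem.Str.startswith (PySem.Str.strip line) "## Tweet"

-- ===== PORT A =====
-- the loop body of A: state = (tweets, current_lines)
def pvAStep (st : List String × List String) (line : String) : List String × List String :=
  if pvIsTweetHeader line && !st.2.isEmpty then
    let text := PySem.Str.strip (PySem.Str.join "\n" st.2)
    (if text != "" then st.1 ++ [text] else st.1, [])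
  else if !(pvIsTweetHeader line) then
    (st.1, st.2 ++ [line])
  else
    st

def format_twitter_thread (refined_content : String) : List String :=
  -- refined_content.split("\n"): sep is nonempty so split? is always `some`
  let lines := (PySem.Str.split? refined_content "\n").getD []
  let st := lines.foldl pvAStep ([], [])
  -- flush last tweet
  let text := PySem.Str.strip (PySem.Str.join "\n" st.2)
  let tweets := if text != "" then st.1 ++ [text] else st.1
  tweets.filter (fun t => t != "")

-- ===== PORT B =====
-- the while-loop of B: cut at the first header, emit the slice before it, continue after it
def pvAltLoop (tweets : List String) (lines : List String) : List String :=
  if h : lines = [] then tweets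
  else
    -- next((i for i, l in enumerate(lines) if is_header(l)), len(lines))
    let cut := (lines.findIdx? pvIsTweetHeader).getD lines.length
    let text := PySem.Str.strip (PySem.Str.join "\n" (PySem.List.slice lines none (some (cut : Int))))
    let tweets' := if text != "" then tweets ++ [text] else tweets
    pvAltLoop tweets' (PySem.List.slice lines (some ((cut + 1 : Nat) : Int)) none)
termination_by lines.length
decreasing_by
  have hpos : 0 < lines.length := List.length_pos_iff.mpr h
  rw [PySem.List.slice_from lines (by positivity)]
  simp only [List.length_drop, Int.toNat_natCast]
  omega

def format_twitter_thread_alt (refined_content : String) : List String :=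
  pvAltLoop [] ((PySem.Str.split? refined_content "\n").getD [])

-- ===== PRECONDITION & SPEC =====
def Spec_format_twitter_thread (refined_content : String) (out : List String) : Prop := out = format_twitter_thread_alt refined_content
instance (refined_content : String) (out : List String) : Decidable (Spec_format_twitter_thread refined_content out) := by unfold Spec_format_twitter_thread; infer_instance

-- ===== CLAIM (what is proved, stated in full; the proofs are below) =====
def Claim_equal_format_twitter_thread : Prop := ∀ (refined_content : String), Dom_format_twitter_thread refined_content → Spec_format_twitter_thread refined_content (format_twitter_thread refined_content)

-- ===== LEMMAS AND PROOFS =====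

-- "\n".join(cur).strip(), kept if nonempty
def pvEmit (cur : List String) : List String :=
  if PySem.Str.strip (PySem.Str.join "\n" cur) != "" then
    [PySem.Str.strip (PySem.Str.join "\n" cur)] else []

-- reference shape: the maximal non-header runs, emitted in order
def pvGo (cur : List String) : List String → List String
  | [] => pvEmit cur
  | l :: ls => if pvIsTweetHeader l then pvEmit cur ++ pvGo [] ls else pvGo (cur ++ [l]) ls

lemma pvEmit_nil : pvEmit [] = [] := by decide

lemma pvEmit_ne (t : String) (ht : t ∈ pvEmit cur) : t ≠ "" := by
  unfold pvEmit at ht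
  split at ht
  · next h => simp at ht; subst ht; simpa using h
  · simp at ht

lemma pvGo_ne (lines : List String) : ∀ cur t, t ∈ pvGo cur lines → t ≠ "" := by
  induction lines with
  | nil => intro cur t ht; exact pvEmit_ne t ht
  | cons l ls ih =>
    intro cur t ht
    simp only [pvGo] at ht
    split at ht
    · rcases List.mem_append.mp ht with h | h
      · exact pvEmit_ne t h
      · exact ih [] t h
    · exact ih _ t ht

lemma pvFold_go (lines : List String) : ∀ ts cur,
    (lines.foldl pvAStep (ts, cur)).1 ++ pvEmit (lines.foldl pvAStep (ts, cur)).2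
      = ts ++ pvGo cur lines := by
  induction lines with
  | nil => intro ts cur; simp [pvGo]
  | cons l ls ih =>
    intro ts cur
    simp only [List.foldl_cons, pvGo]
    by_cases hh : pvIsTweetHeader l
    · by_cases hc : cur = ([] : List String)
      · subst hc
        simp [pvAStep, hh, ih, pvEmit_nil]
      · have : pvAStep (ts, cur) l
            = (if PySem.Str.strip (PySem.Str.join "\n" cur) != "" then
                 ts ++ [PySem.Str.strip (PySem.Str.join "\n" cur)] else ts, []) := by
          simp [pvAStep, hh, hc]
        rw [this, ih]
        have : (if PySem.Str.strip (PySem.Str.join "\n" cur) != "" then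
                 ts ++ [PySem.Str.strip (PySem.Str.join "\n" cur)] else ts)
              = ts ++ pvEmit cur := by
          unfold pvEmit; split <;> simp
        rw [this, hh]
        simp
    · have : pvAStep (ts, cur) l = (ts, cur ++ [l]) := by
        simp [pvAStep, hh]
      rw [this, ih, if_neg (by simp [hh])]

lemma pvGo_none (lines : List String) (h : lines.findIdx? pvIsTweetHeader = none) :
    ∀ cur, pvGo cur lines = pvEmit (cur ++ lines) := by
  induction lines with
  | nil => intro cur; simp [pvGo]
  | cons l ls ih =>
    intro cur
    rw [List.findIdx?_cons] at h
    by_cases hh : pvIsTweetHeader l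
    · simp [hh] at h
    · simp only [hh, Bool.false_eq_true, ite_false] at h
      have h' : ls.findIdx? pvIsTweetHeader = none := by
        cases hx : ls.findIdx? pvIsTweetHeader with
        | none => rfl
        | some c => rw [hx] at h; simp at h
      simp only [pvGo, hh, Bool.false_eq_true, if_false]
      rw [ih h']
      simp

lemma pvGo_some (lines : List String) : ∀ c cur,
    lines.findIdx? pvIsTweetHeader = some c →
    pvGo cur lines = pvEmit (cur ++ lines.take c) ++ pvGo [] (lines.drop (c + 1)) := by
  induction lines with
  | nil => intro c cur h; simp at h
  | cons l ls ih =>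
    intro c cur h
    rw [List.findIdx?_cons] at h
    by_cases hh : pvIsTweetHeader l
    · simp only [hh, if_true, Option.some.injEq] at h
      subst h
      simp [pvGo, hh]
    · simp only [hh, Bool.false_eq_true, if_false] at h
      cases hx : ls.findIdx? pvIsTweetHeader with
      | none => rw [hx] at h; simp at h
      | some c' =>
        rw [hx] at h
        simp only [Option.map_some, Option.some.injEq] at h
        subst h
        simp only [pvGo, hh, Bool.false_eq_true, if_false]
        rw [ih c' (cur ++ [l]) hx]
        simp [List.take_succ_cons, List.drop_succ_cons]

lemma pvAltLoop_nil (ts : List String) : pvAltLoop ts [] = ts := by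
  rw [pvAltLoop]; simp

lemma pvAltLoop_go : ∀ (n : Nat) (lines : List String), lines.length ≤ n →
    ∀ ts, pvAltLoop ts lines = ts ++ pvGo [] lines := by
  intro n
  induction n with
  | zero =>
    intro lines hlen ts
    have h0 : lines = [] := List.eq_nil_of_length_eq_zero (Nat.le_zero.mp hlen)
    subst h0
    rw [pvAltLoop]
    simp [pvGo, pvEmit_nil]
  | succ n ihn =>
    intro lines hlen ts
    by_cases h : lines = []
    · subst h
      rw [pvAltLoop]
      simp [pvGo, pvEmit_nil]
    · have hpos : 0 < lines.length := List.length_pos_iff.mpr h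
      rw [pvAltLoop, dif_neg h]
      cases hx : lines.findIdx? pvIsTweetHeader with
      | none =>
        simp only [Option.getD_none]
        rw [PySem.List.slice_to lines (by positivity),
            PySem.List.slice_from lines (by positivity)]
        simp only [Int.toNat_natCast, List.take_length]
        rw [List.drop_eq_nil_of_le (by omega)]
        rw [pvAltLoop_nil]
        rw [pvGo_none lines hx []]
        simp only [List.nil_append]
        unfold pvEmit
        split <;> simp
      | some c =>
        simp only [Option.getD_some]
        rw [PySem.List.slice_to lines (by positivity),
            PySem.List.slice_from lines (by positivity)]
        simp only [Int.toNat_natCast]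
        have hlen' : (lines.drop (c + 1)).length ≤ n := by
          simp only [List.length_drop]; omega
        rw [ihn (lines.drop (c + 1)) hlen']
        rw [pvGo_some lines c [] hx]
        simp only [List.nil_append]
        unfold pvEmit
        split <;> simp

-- ===== VERDICT (by name: the statement is the Claim_ definition above) =====
theorem format_twitter_thread_spec : Claim_equal_format_twitter_thread := by
  intro rc _
  unfold Spec_format_twitter_thread format_twitter_thread format_twitter_thread_alt
  set lines := (PySem.Str.split? rc "\n").getD [] with hl
  rw [pvAltLoop_go lines.length lines le_rfl []]
  simp only [List.nil_append]
  have hfold := pvFold_go lines [] []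
  simp only [List.nil_append] at hfold
  have hfin : (if PySem.Str.strip (PySem.Str.join "\n" (lines.foldl pvAStep ([], [])).2) != "" then
        (lines.foldl pvAStep ([], [])).1 ++ [PySem.Str.strip (PySem.Str.join "\n" (lines.foldl pvAStep ([], [])).2)]
      else (lines.foldl pvAStep ([], [])).1)
      = (lines.foldl pvAStep ([], [])).1 ++ pvEmit (lines.foldl pvAStep ([], [])).2 := by
    unfold pvEmit; split <;> simp
  rw [hfin, hfold]
  exact List.filter_eq_self.mpr (fun t ht => by
    simpa using pvGo_ne lines [] t ht)
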